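-- pv_equiv track=rewrite | github.com/BrnA122/LFP_Proyecto2_202001086 | Analizador/Analizador.py | armar_multilinea
-- ===== SOURCE A (Python) =====
-- def armar_multilinea(lexema):
--     estado = 0
--     valido = [4]
--
--     for char in lexema:
--         if estado == 0:
--             if char == "/":
--                 estado = 1
--             else:
--                 estado = -5
--         elif estado == 1:
--             if char == "*":
--                 estado = 2
--             else:
--                 estado = -5
--         elif estado == 2:
--             if char == "*":
--                 estado = 3
--             elif char == "\n" or char != "\n" :
--                 estado = 2
--             else:
--                 estado = -5
--         elif estado == 3:
--             if char == "/":
--                 estado = 4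
--             else:
--                 estado = -5
--         elif estado == 4:
--             if char == "/" or char != "/":
--                 estado = -5
--
--     if estado in valido:
--         return True
--     else:
--         return False
-- ===== SOURCE B (Python) =====
-- def armar_multilinea(lexema):
--     return (len(lexema) >= 4
--             and lexema[0] == "/" and lexema[1] == "*"
--             and lexema[-2] == "*" and lexema[-1] == "/"
--             and "*" not in lexema[2:-2])
-- ===== Notes on version B (the rewrite author's own statement) =====
-- stated objective: simpler
-- what changed: Replaced the hand-written 6-state DFA character loop with a single boolean predicate: length at least 4, opens with the comment-open pair, closes with the comment-close pair, and no star in the interior slice.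
import Mathlib
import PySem

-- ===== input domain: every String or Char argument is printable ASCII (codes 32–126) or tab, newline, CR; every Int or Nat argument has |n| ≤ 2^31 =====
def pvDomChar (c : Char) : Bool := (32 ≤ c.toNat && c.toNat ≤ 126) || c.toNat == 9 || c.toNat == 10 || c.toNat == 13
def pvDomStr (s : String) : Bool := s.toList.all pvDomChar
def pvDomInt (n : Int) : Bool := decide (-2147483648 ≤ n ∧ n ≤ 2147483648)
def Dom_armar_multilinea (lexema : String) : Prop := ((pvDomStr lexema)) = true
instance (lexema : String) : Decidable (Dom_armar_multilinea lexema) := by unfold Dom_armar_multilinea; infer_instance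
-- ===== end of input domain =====

-- B replaces A's hand-written 6-state DFA loop with one boolean predicate (open "/*", close "*/", no '*' in the interior); objective: simpler.

-- ===== PORT A =====
-- one step of A's state machine, branch for branch
def pvStepA (estado : Int) (c : Char) : Int :=
  if estado = 0 then (if c = '/' then 1 else -5)
  else if estado = 1 then (if c = '*' then 2 else -5)
  else if estado = 2 then
    (if c = '*' then 3 else if c = '\n' ∨ c ≠ '\n' then 2 else -5)
  else if estado = 3 then (if c = '/' then 4 else -5)
  else if estado = 4 then (if c = '/' ∨ c ≠ '/' then -5 else estado)
  else estado

def armar_multilinea (lexema : String) : Bool :=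
  let valido : List Int := [4]
  let estado := lexema.toList.foldl pvStepA 0
  if estado ∈ valido then true else false

-- ===== PORT B =====
def armar_multilinea_alt (lexema : String) : Bool :=
  decide (4 ≤ PySem.Str.len lexema)
    && (PySem.Str.pyGet? lexema 0 == some '/')
    && (PySem.Str.pyGet? lexema 1 == some '*')
    && (PySem.Str.pyGet? lexema (-2) == some '*')
    && (PySem.Str.pyGet? lexema (-1) == some '/')
    && !(PySem.Str.isIn "*" (PySem.Str.slice lexema (some 2) (some (-2))))

-- ===== PRECONDITION & SPEC =====
def Spec_armar_multilinea (lexema : String) (out : Bool) : Prop := out = armar_multilinea_alt lexema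
instance (lexema : String) (out : Bool) : Decidable (Spec_armar_multilinea lexema out) := by unfold Spec_armar_multilinea; infer_instance

-- ===== CLAIM (what is proved, stated in full; the proofs are below) =====
def Claim_equal_armar_multilinea : Prop := ∀ (lexema : String), Dom_armar_multilinea lexema → Spec_armar_multilinea lexema (armar_multilinea lexema)

-- ===== LEMMAS AND PROOFS =====

-- the language both programs recognise
def pvGood (l : List Char) : Prop := ∃ m, l = '/' :: '*' :: (m ++ ['*', '/']) ∧ '*' ∉ m

lemma pvDead (l : List Char) : l.foldl pvStepA (-5) = -5 := by
  induction l with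
  | nil => rfl
  | cons c t ih => simpa [pvStepA] using ih

lemma pvF4 (l : List Char) : l.foldl pvStepA 4 = if l = [] then 4 else -5 := by
  cases l with
  | nil => rfl
  | cons c t =>
    rw [List.foldl_cons, show pvStepA 4 c = -5 from by by_cases h : c = '/' <;> simp [pvStepA, h]]
    simp [pvDead]

lemma pvF3 (l : List Char) : l.foldl pvStepA 3 = 4 ↔ l = ['/'] := by
  cases l with
  | nil => simp
  | cons c t =>
    by_cases hc : c = '/'
    · subst hc
      simp [pvStepA, pvF4]
    · simp [pvStepA, hc, pvDead]

lemma pvF2 (l : List Char) :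
    l.foldl pvStepA 2 = 4 ↔ ∃ m, l = m ++ ['*', '/'] ∧ '*' ∉ m := by
  induction l with
  | nil => simp
  | cons c t ih =>
    by_cases hc : c = '*'
    · subst hc
      simp only [List.foldl_cons, show pvStepA 2 '*' = 3 by rfl, pvF3]
      constructor
      · rintro rfl; exact ⟨[], by simp⟩
      · rintro ⟨m, heq, hm⟩
        cases m with
        | nil => simpa using heq
        | cons x m' =>
          obtain rfl : '*' = x := List.head_eq_of_cons_eq heq
          simp at hm
    · have hstep : pvStepA 2 c = 2 := by
        by_cases hn : c = '\n' <;> simp [pvStepA, hc, hn]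
      simp only [List.foldl_cons, hstep, ih]
      constructor
      · rintro ⟨m, rfl, hm⟩
        exact ⟨c :: m, rfl, by simp [hm, Ne.symm hc]⟩
      · rintro ⟨m, heq, hm⟩
        cases m with
        | nil =>
          exfalso; apply hc
          simpa using (List.head_eq_of_cons_eq heq)
        | cons x m' =>
          obtain ⟨rfl, rfl⟩ : c = x ∧ t = m' ++ ['*', '/'] := by
            constructor
            · simpa using List.head_eq_of_cons_eq heq
            · simpa using List.tail_eq_of_cons_eq heq
          exact ⟨m', rfl, fun h => hm (List.mem_cons_of_mem _ h)⟩

lemma pvAchar (l : List Char) : l.foldl pvStepA 0 = 4 ↔ pvGood l := by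
  cases l with
  | nil => simp [pvGood]
  | cons c1 t1 =>
    cases t1 with
    | nil =>
      by_cases h1 : c1 = '/' <;> simp [pvStepA, pvGood, h1]
    | cons c2 t =>
      by_cases h1 : c1 = '/'
      · by_cases h2 : c2 = '*'
        · subst h1; subst h2
          simp only [List.foldl_cons, show pvStepA 0 '/' = 1 by rfl,
            show pvStepA 1 '*' = 2 by rfl, pvF2, pvGood]
          constructor
          · rintro ⟨m, rfl, hm⟩; exact ⟨m, rfl, hm⟩
          · rintro ⟨m, heq, hm⟩
            exact ⟨m, by simpa using heq, hm⟩
        · subst h1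
          simp only [List.foldl_cons, show pvStepA 0 '/' = 1 from rfl]
          rw [show pvStepA 1 c2 = -5 from by simp [pvStepA, h2]]
          rw [pvDead]
          simp only [show ((-5 : Int) = 4) ↔ False from by decide, false_iff]
          rintro ⟨m, heq, -⟩
          simp at heq
          exact h2 heq.1
      · simp only [List.foldl_cons]
        rw [show pvStepA 0 c1 = -5 from by simp [pvStepA, h1]]
        rw [show pvStepA (-5) c2 = -5 from by norm_num [pvStepA]]
        rw [pvDead]
        simp only [show ((-5 : Int) = 4) ↔ False from by decide, false_iff]
        rintro ⟨m, heq, -⟩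
        simp at heq
        exact h1 heq.1

-- evaluation of B's primitives on the canonical decomposition '/' :: '*' :: m ++ [d, d']
lemma pvGet2 (m : List Char) (d d' : Char) :
    PySem.List.pyGet? ('/' :: '*' :: (m ++ [d, d'])) (-2) = some d := by
  rw [PySem.List.pyGet?_neg_ofNat _ 2 (by omega) (by simp)]
  simp

lemma pvSliceMid (m : List Char) (d d' : Char) :
    PySem.List.slice ('/' :: '*' :: (m ++ [d, d'])) (some 2) (some (-2)) = m := by
  simp [PySem.List.slice]

lemma pvSplitLast2 (t : List Char) (h : 2 ≤ t.length) :
    ∃ m d d', t = m ++ [d, d'] := by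
  rcases hr : t.reverse with _ | ⟨x, _ | ⟨y, r⟩⟩
  · simp_all
  · have := congrArg List.length hr; simp at this; omega
  · exact ⟨r.reverse, y, x, by
      have := congrArg List.reverse hr; simpa using this⟩

lemma pvGetLast (m : List Char) (d d' : Char) :
    ('/' :: '*' :: (m ++ [d, d'])).getLast? = some d' := by
  rw [show '/' :: '*' :: (m ++ [d, d']) = ('/' :: '*' :: (m ++ [d])) ++ [d'] from by simp]
  exact List.getLast?_concat

lemma pvBlist (l : List Char) :
    ((((4 ≤ (l.length : Int) ∧ l[0]? = some '/') ∧ l[1]? = some '*') ∧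
          PySem.List.pyGet? l (-2) = some '*') ∧
        l.getLast? = some '/') ∧
      ¬ ['*'] <:+: PySem.List.slice l (some 2) (some (-2)) ↔ pvGood l := by
  constructor
  · rintro ⟨⟨⟨⟨⟨hlen, h0⟩, h1⟩, h2⟩, h3⟩, h4⟩
    have hlen' : 4 ≤ l.length := by exact_mod_cast hlen
    rcases l with _ | ⟨c0, _ | ⟨c1, t⟩⟩
    · simp at hlen'
    · simp at hlen'
    · obtain rfl : c0 = '/' := by simpa using h0
      obtain rfl : c1 = '*' := by simpa using h1
      have ht : 2 ≤ t.length := by simp at hlen'; omega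
      obtain ⟨m, d, d', rfl⟩ := pvSplitLast2 t ht
      rw [pvGet2] at h2
      obtain rfl : d = '*' := by simpa using h2
      rw [pvGetLast] at h3
      obtain rfl : d' = '/' := by simpa using h3
      rw [pvSliceMid] at h4
      refine ⟨m, rfl, fun hmem => h4 ?_⟩
      obtain ⟨s1, s2, rfl⟩ := List.append_of_mem hmem
      exact ⟨s1, s2, by simp⟩
  · rintro ⟨m, rfl, hm⟩
    refine ⟨⟨⟨⟨⟨?_, by simp⟩, by simp⟩, pvGet2 m '*' '/'⟩, pvGetLast m '*' '/'⟩, ?_⟩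
    · simp; omega
    · rw [pvSliceMid]
      exact fun hinf => hm (hinf.subset (by simp))

lemma pvBchar (s : String) : armar_multilinea_alt s = true ↔ pvGood s.toList := by
  unfold armar_multilinea_alt
  simp only [pysem, Bool.and_eq_true, decide_eq_true_eq, beq_iff_eq, Bool.not_eq_true']
  rw [show "*".toList = ['*'] from rfl]
  exact pvBlist s.toList

theorem pvMain (s : String) : armar_multilinea s = armar_multilinea_alt s := by
  rw [Bool.eq_iff_iff, pvBchar]
  unfold armar_multilinea
  simp [pvAchar]

-- ===== VERDICT (by name: the statement is the Claim_ definition above) =====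
theorem armar_multilinea_spec : Claim_equal_armar_multilinea := by
  intro lexema _
  unfold Spec_armar_multilinea
  exact pvMain lexema
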